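-- pv_equiv track=rewrite | github.com/ucare-uchicago/mlec-sim | src/helpers/netdp_prio.py | stripe_fail_cases
-- ===== SOURCE A (Python) =====
-- import math
--
-- stripe_fail_cases_dict = {}
--
-- def stripe_fail_cases(num_chunks_in_stripe, num_failures, drives_per_rack, failures_per_other_affected_rack_list, num_healthy_racks):
--     key = (num_chunks_in_stripe, num_failures, drives_per_rack, tuple(failures_per_other_affected_rack_list), num_healthy_racks)
--     if key in stripe_fail_cases_dict:
--         return stripe_fail_cases_dict[key]
--
--     num_other_affected_racks = len(failures_per_other_affected_rack_list)
--     num_other_racks = num_other_affected_racks + num_healthy_racks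
--     if num_other_racks < num_chunks_in_stripe:
--         return 0
--     if num_failures > num_chunks_in_stripe:
--         return 0
--     if num_failures > num_other_affected_racks:
--         return 0
--     if num_failures < 0:
--         return 0
--
--     if num_other_affected_racks == 0:    # then must have num_failures = 0
--         count = math.comb(num_healthy_racks, num_chunks_in_stripe) * (drives_per_rack ** num_chunks_in_stripe)
--         stripe_fail_cases_dict[key] = count
--         return count
--     else:
--         failed_disks_first_rack = failures_per_other_affected_rack_list[0]
--         failures_per_other_affected_rack_subset = failures_per_other_affected_rack_list[1:]
--         count = (failed_disks_first_rack * stripe_fail_cases(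
--                         num_chunks_in_stripe-1, num_failures-1, drives_per_rack, failures_per_other_affected_rack_subset, num_healthy_racks)
--             + (drives_per_rack - failed_disks_first_rack) * stripe_fail_cases(
--                         num_chunks_in_stripe-1, num_failures, drives_per_rack, failures_per_other_affected_rack_subset, num_healthy_racks)
--             + stripe_fail_cases(num_chunks_in_stripe, num_failures, drives_per_rack, failures_per_other_affected_rack_subset, num_healthy_racks))
--         stripe_fail_cases_dict[key] = count
--         return count
-- ===== SOURCE B (Python) =====
-- import math
--
-- def stripe_fail_cases(num_chunks_in_stripe, num_failures, drives_per_rack, failures_per_other_affected_rack_list, num_healthy_racks):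
--     # Bottom-up DP: process affected racks from the last to the first, keeping a
--     # 2D table over offsets (i, j) so that layer k holds the count for the last k
--     # racks with (chunks, failures) = (num_chunks_in_stripe - i, num_failures - j).
--     C, F, D, H = num_chunks_in_stripe, num_failures, drives_per_rack, num_healthy_racks
--     n = len(failures_per_other_affected_rack_list)
--     if F < 0 or F > n or F > C or n + H < C:   # infeasible: the DP answer is 0
--         return 0
--
--     def blocked(c, f, k):
--         return k + H < c or f > c or f > k or f < 0
--
--     prev = [[0 if blocked(C - i, F - j, 0) else math.comb(H, C - i) * D ** (C - i)
--              for j in range(n + 1)] for i in range(n + 1)]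
--     k = 0
--     for x in reversed(failures_per_other_affected_rack_list):
--         k += 1
--         prev = [[0 if blocked(C - i, F - j, k)
--                  else x * prev[i + 1][j + 1] + (D - x) * prev[i + 1][j] + prev[i][j]
--                  for j in range(n - k + 1)] for i in range(n - k + 1)]
--     return prev[0][0]
-- ===== Notes on version B (the rewrite author's own statement) =====
-- stated objective: alternative
-- what changed: Replaced the memoized top-down recursion (global cache dict, three recursive calls per rack) by a bottom-up iterative DP that walks the rack list from the end, maintaining a 2D offset-indexed table per layer and reading off the (0,0) entry.
import Mathlib
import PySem

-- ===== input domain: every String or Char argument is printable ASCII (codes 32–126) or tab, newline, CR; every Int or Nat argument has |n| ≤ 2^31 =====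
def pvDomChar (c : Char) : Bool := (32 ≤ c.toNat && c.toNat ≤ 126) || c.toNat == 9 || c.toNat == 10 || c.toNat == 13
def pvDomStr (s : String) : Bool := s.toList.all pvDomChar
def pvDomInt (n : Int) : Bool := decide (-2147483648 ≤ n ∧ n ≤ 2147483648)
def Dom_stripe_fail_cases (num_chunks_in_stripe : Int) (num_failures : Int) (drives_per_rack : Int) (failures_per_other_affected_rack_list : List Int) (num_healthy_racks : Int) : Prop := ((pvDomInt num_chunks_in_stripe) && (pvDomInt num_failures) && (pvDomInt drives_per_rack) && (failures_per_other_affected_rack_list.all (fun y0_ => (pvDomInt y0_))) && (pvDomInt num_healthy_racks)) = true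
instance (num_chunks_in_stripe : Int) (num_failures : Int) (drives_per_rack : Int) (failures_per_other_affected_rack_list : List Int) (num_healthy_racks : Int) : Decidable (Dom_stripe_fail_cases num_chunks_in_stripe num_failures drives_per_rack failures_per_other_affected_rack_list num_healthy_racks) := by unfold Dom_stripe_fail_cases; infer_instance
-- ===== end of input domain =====

-- B replaces A's memoized top-down recursion by a bottom-up iterative DP over a 2D offset
-- table built from the last affected rack to the first (objective: alternative decomposition).
-- A's global memo dict is a pure cache and does not affect the return value; it is not ported.

-- ===== PORT A =====
-- Literal port of A's recursion (the memo lookup is value-transparent and omitted).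
-- In the base branch Python's math.comb(H, C) and D ** C are reached only with 0 ≤ C ≤ H
-- (forced by the surrounding guards), where Nat.choose H.toNat C.toNat and D ^ C.toNat are exact.
def stripe_fail_cases (num_chunks_in_stripe : Int) (num_failures : Int) (drives_per_rack : Int) (failures_per_other_affected_rack_list : List Int) (num_healthy_racks : Int) : Int :=
  if ((failures_per_other_affected_rack_list.length : Int) + num_healthy_racks < num_chunks_in_stripe) then 0
  else if num_failures > num_chunks_in_stripe then 0
  else if num_failures > (failures_per_other_affected_rack_list.length : Int) then 0
  else if num_failures < 0 then 0
  else
    match failures_per_other_affected_rack_list with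
    | [] => (Nat.choose num_healthy_racks.toNat num_chunks_in_stripe.toNat : Int) * drives_per_rack ^ num_chunks_in_stripe.toNat
    | x :: t =>
        x * stripe_fail_cases (num_chunks_in_stripe - 1) (num_failures - 1) drives_per_rack t num_healthy_racks
        + (drives_per_rack - x) * stripe_fail_cases (num_chunks_in_stripe - 1) num_failures drives_per_rack t num_healthy_racks
        + stripe_fail_cases num_chunks_in_stripe num_failures drives_per_rack t num_healthy_racks

-- ===== PORT B =====
-- Table cell read (Python's prev[i][j]; indices are always in range in B's loop).
def sfcEntry (T : List (List Int)) (i j : Nat) : Int := (T.getD i []).getD j 0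

-- Source B's base-layer comprehension (suffix of length 0).
def sfcInit (C F D H : Int) (n : Nat) : List (List Int) :=
  (List.range (n + 1)).map (fun (i : Nat) => (List.range (n + 1)).map (fun (j : Nat) =>
    -- Source B's inner `blocked(c, f, k)` is inlined here (k = 0)
    if ((((0 : Nat) : Int)) + H < C - (i : Int) ∨ F - (j : Int) > C - (i : Int) ∨ F - (j : Int) > (((0 : Nat) : Int)) ∨ F - (j : Int) < 0) then 0
    else (Nat.choose H.toNat (C - (i : Int)).toNat : Int) * D ^ (C - (i : Int)).toNat))

-- Source B's per-rack layer update (the comprehension inside the loop).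
def sfcStep (C F D H x : Int) (k m : Nat) (prev : List (List Int)) : List (List Int) :=
  (List.range (m + 1)).map (fun (i : Nat) => (List.range (m + 1)).map (fun (j : Nat) =>
    -- Source B's inner `blocked(c, f, k)` is inlined here
    if (((k : Int)) + H < C - (i : Int) ∨ F - (j : Int) > C - (i : Int) ∨ F - (j : Int) > ((k : Int)) ∨ F - (j : Int) < 0) then 0
    else x * sfcEntry prev (i + 1) (j + 1) + (D - x) * sfcEntry prev (i + 1) j + sfcEntry prev i j))

-- Source B's `for x in reversed(...)` loop with the counter k, as a fold.
def sfcFold (C F D H : Int) (n : Nat) (r : List Int) : Nat × List (List Int) :=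
  r.foldl (fun st x => (st.1 + 1, sfcStep C F D H x (st.1 + 1) (n - (st.1 + 1)) st.2))
    (0, sfcInit C F D H n)

def stripe_fail_cases_alt (num_chunks_in_stripe : Int) (num_failures : Int) (drives_per_rack : Int) (failures_per_other_affected_rack_list : List Int) (num_healthy_racks : Int) : Int :=
  -- Source B's feasibility early return, then the DP
  if (num_failures < 0 ∨ num_failures > (failures_per_other_affected_rack_list.length : Int) ∨
      num_failures > num_chunks_in_stripe ∨
      (failures_per_other_affected_rack_list.length : Int) + num_healthy_racks < num_chunks_in_stripe) then 0
  else sfcEntry (sfcFold num_chunks_in_stripe num_failures drives_per_rack num_healthy_racks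
      failures_per_other_affected_rack_list.length failures_per_other_affected_rack_list.reverse).2 0 0

-- ===== PRECONDITION & SPEC =====
def Spec_stripe_fail_cases (num_chunks_in_stripe : Int) (num_failures : Int) (drives_per_rack : Int) (failures_per_other_affected_rack_list : List Int) (num_healthy_racks : Int) (out : Int) : Prop := out = stripe_fail_cases_alt num_chunks_in_stripe num_failures drives_per_rack failures_per_other_affected_rack_list num_healthy_racks
instance (num_chunks_in_stripe : Int) (num_failures : Int) (drives_per_rack : Int) (failures_per_other_affected_rack_list : List Int) (num_healthy_racks : Int) (out : Int) : Decidable (Spec_stripe_fail_cases num_chunks_in_stripe num_failures drives_per_rack failures_per_other_affected_rack_list num_healthy_racks out) := by unfold Spec_stripe_fail_cases; infer_instance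

-- ===== CLAIM (what is proved, stated in full; the proofs are below) =====
def Claim_equal_stripe_fail_cases : Prop := ∀ (num_chunks_in_stripe : Int) (num_failures : Int) (drives_per_rack : Int) (failures_per_other_affected_rack_list : List Int) (num_healthy_racks : Int), Dom_stripe_fail_cases num_chunks_in_stripe num_failures drives_per_rack failures_per_other_affected_rack_list num_healthy_racks → Spec_stripe_fail_cases num_chunks_in_stripe num_failures drives_per_rack failures_per_other_affected_rack_list num_healthy_racks (stripe_fail_cases num_chunks_in_stripe num_failures drives_per_rack failures_per_other_affected_rack_list num_healthy_racks)

-- ===== LEMMAS AND PROOFS =====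

lemma sfcEntry_map_range (m : Nat) (f : Nat → Nat → Int) (i j : Nat) (hi : i < m) (hj : j < m) :
    sfcEntry ((List.range m).map (fun i => (List.range m).map (fun j => f i j))) i j = f i j := by
  simp [sfcEntry, List.getD, hi, hj]

-- Loop invariant: after folding a prefix r of the reversed list, the counter equals r.length and
-- cell (i, j) of the table is A's value at (C - i, F - j) on the suffix r.reverse.
lemma sfc_loop (C F D H : Int) (n : Nat) (r : List Int) (hr : r.length ≤ n) :
    (sfcFold C F D H n r).1 = r.length ∧
    ∀ i j : Nat, i ≤ n - r.length → j ≤ n - r.length →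
      sfcEntry (sfcFold C F D H n r).2 i j = stripe_fail_cases (C - i) (F - j) D r.reverse H := by
  induction r using List.reverseRecOn with
  | nil =>
      refine ⟨rfl, fun i j hi hj => ?_⟩
      simp only [sfcFold, List.foldl_nil, sfcInit]
      rw [sfcEntry_map_range (n + 1) _ i j (by omega) (by omega)]
      rw [stripe_fail_cases.eq_def]
      simp only [List.length_nil, List.reverse_nil, Nat.cast_zero]
      split_ifs <;> first | rfl | omega
  | append_singleton r' x ih =>
      have hr' : r'.length ≤ n := by simp at hr; omega
      obtain ⟨hk, hent⟩ := ih hr'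
      have hfold : sfcFold C F D H n (r' ++ [x])
          = ((sfcFold C F D H n r').1 + 1,
             sfcStep C F D H x ((sfcFold C F D H n r').1 + 1)
               (n - ((sfcFold C F D H n r').1 + 1)) (sfcFold C F D H n r').2) := by
        simp [sfcFold, List.foldl_append]
      refine ⟨by simp [hfold, hk], fun i j hi hj => ?_⟩
      have hlen : (r' ++ [x]).length = r'.length + 1 := by simp
      rw [hlen] at hi hj
      rw [hfold]
      simp only [hk]
      rw [show (sfcStep C F D H x (r'.length + 1) (n - (r'.length + 1)) (sfcFold C F D H n r').2)
          = (List.range (n - (r'.length + 1) + 1)).map (fun (i : Nat) => (List.range (n - (r'.length + 1) + 1)).map (fun (j : Nat) =>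
              if (((r'.length + 1 : Int)) + H < C - (i : Int) ∨ F - (j : Int) > C - (i : Int) ∨ F - (j : Int) > ((r'.length + 1 : Int)) ∨ F - (j : Int) < 0) then 0
              else x * sfcEntry (sfcFold C F D H n r').2 (i + 1) (j + 1)
                   + (D - x) * sfcEntry (sfcFold C F D H n r').2 (i + 1) j
                   + sfcEntry (sfcFold C F D H n r').2 i j)) from rfl]
      rw [sfcEntry_map_range _ _ i j (by omega) (by omega)]
      have e1 := hent (i + 1) (j + 1) (by omega) (by omega)
      have e2 := hent (i + 1) j (by omega) (by omega)
      have e3 := hent i j (by omega) (by omega)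
      have hrev : (r' ++ [x]).reverse = x :: r'.reverse := by simp
      rw [hrev, stripe_fail_cases.eq_def]
      simp only [List.length_cons, List.length_reverse]
      rw [e1, e2, e3]
      have c1 : C - ((i : Int) + 1) = C - (i : Int) - 1 := by ring
      have c2 : F - ((j : Int) + 1) = F - (j : Int) - 1 := by ring
      simp only [Nat.cast_add, Nat.cast_one, c1, c2]
      split_ifs <;> first | rfl | (push_cast at *; omega)

-- ===== VERDICT (by name: the statement is the Claim_ definition above) =====
theorem stripe_fail_cases_spec : Claim_equal_stripe_fail_cases := by
  intro C F D L H _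
  unfold Spec_stripe_fail_cases stripe_fail_cases_alt
  by_cases h : (F < 0 ∨ F > (L.length : Int) ∨ F > C ∨ (L.length : Int) + H < C)
  · rw [if_pos h, stripe_fail_cases.eq_def]
    split_ifs <;> first | rfl | (exfalso; omega)
  · rw [if_neg h]
    obtain ⟨-, hent⟩ := sfc_loop C F D H L.length L.reverse (by simp)
    have := hent 0 0 (by omega) (by omega)
    simpa using this.symm
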